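-- pv_equiv track=rewrite | github.com/n3ling49/sec-header-analysis | src/evaluation/evaluation.py | get_total_header_count
-- ===== SOURCE A (Python) =====
-- def get_total_header_count(headers, req_res_err_headers, key, security_headers):
--     for header in req_res_err_headers:
--         if not header in security_headers:
--             continue
--         if header in headers:
--             if key in headers[header]:
--                 headers[header][key] += 1
--             else:
--                 headers[header][key] = 1
--         else:
--             headers[header] = dict()
--             headers[header][key] = 1
--     return headers
-- ===== SOURCE B (Python) =====
-- def get_total_header_count(headers, req_res_err_headers, key, security_headers):
--     counts = {}
--     for h in req_res_err_headers:
--         if h in security_headers: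
--             counts[h] = counts.get(h, 0) + 1
--     for header, count in counts.items():
--         inner = headers.setdefault(header, {})
--         inner[key] = inner.get(key, 0) + count
--     return headers
-- ===== Notes on version B (the rewrite author's own statement) =====
-- stated objective: alternative
-- what changed: A increments headers[header][key] by 1 per occurrence in a single per-element loop; B first tallies the security-header occurrences into a separate counts dict, then folds each (header, count) into the nested dict with one bulk += count per distinct header.
import Mathlib
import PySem

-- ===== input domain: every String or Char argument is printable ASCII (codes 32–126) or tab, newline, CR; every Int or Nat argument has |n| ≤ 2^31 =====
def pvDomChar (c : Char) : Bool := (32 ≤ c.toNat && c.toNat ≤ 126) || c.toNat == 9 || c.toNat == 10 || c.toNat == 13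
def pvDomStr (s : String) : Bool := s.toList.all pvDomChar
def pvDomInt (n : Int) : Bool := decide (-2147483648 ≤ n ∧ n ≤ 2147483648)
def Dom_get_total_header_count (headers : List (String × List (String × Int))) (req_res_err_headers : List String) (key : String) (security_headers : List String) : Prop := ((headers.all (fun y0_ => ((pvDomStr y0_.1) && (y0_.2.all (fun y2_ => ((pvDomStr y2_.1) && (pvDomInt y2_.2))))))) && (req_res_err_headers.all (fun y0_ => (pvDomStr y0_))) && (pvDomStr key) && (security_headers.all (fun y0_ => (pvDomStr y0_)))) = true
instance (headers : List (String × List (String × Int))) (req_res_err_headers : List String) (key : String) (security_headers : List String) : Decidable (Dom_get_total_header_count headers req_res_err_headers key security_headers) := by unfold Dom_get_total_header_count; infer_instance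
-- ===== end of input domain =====

-- B replaces A's per-occurrence increment loop by a count-then-merge decomposition (tally the
-- security headers once, then fold the tallied counts into the nested dict in one bulk update);
-- objective: alternative decomposition, same cost. A mutates `headers` in place; the equivalence
-- proved here is about the returned value (B performs the same mutation in Python).

-- ===== PORT A =====
-- per-occurrence loop: for each header in req_res_err_headers that is a security header,
-- increment headers[header][key] by 1 (creating the inner dict / key as needed)
def get_total_header_count (headers : List (String × List (String × Int))) (req_res_err_headers : List String) (key : String) (security_headers : List String) : List (String × List (String × Int)) :=
  ((req_res_err_headers.foldl (fun d header =>
      if !(security_headers.contains header) then d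
      else if d.contains header then
        let inner := d.getD header PySem.Dict.empty
        if inner.contains key then
          d.insert header (inner.insert key (inner.getD key 0 + 1))
        else
          d.insert header (inner.insert key 1)
      else
        d.insert header ((PySem.Dict.empty : PySem.Dict String Int).insert key 1))
    (PySem.Dict.mk (headers.map (fun p => (p.1, PySem.Dict.mk p.2))))).items.map
    (fun p => (p.1, p.2.items)))

-- ===== PORT B =====
-- count-then-merge: first tally the occurrences of security headers, then fold the tallies in
def get_total_header_count_alt (headers : List (String × List (String × Int))) (req_res_err_headers : List String) (key : String) (security_headers : List String) : List (String × List (String × Int)) :=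
  let counts : PySem.Dict String Int :=
    req_res_err_headers.foldl (fun c h =>
      if security_headers.contains h then c.insert h (c.getD h 0 + 1) else c) PySem.Dict.empty
  ((counts.items.foldl (fun d p =>
      let d1 := d.setdefault p.1 (PySem.Dict.empty : PySem.Dict String Int)
      let inner := d1.getD p.1 PySem.Dict.empty
      d1.insert p.1 (inner.insert key (inner.getD key 0 + p.2)))
    (PySem.Dict.mk (headers.map (fun p => (p.1, PySem.Dict.mk p.2))))).items.map
    (fun p => (p.1, p.2.items)))

-- ===== PRECONDITION & SPEC =====
def Spec_get_total_header_count (headers : List (String × List (String × Int))) (req_res_err_headers : List String) (key : String) (security_headers : List String) (out : List (String × List (String × Int))) : Prop := out = get_total_header_count_alt headers req_res_err_headers key security_headers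
instance (headers : List (String × List (String × Int))) (req_res_err_headers : List String) (key : String) (security_headers : List String) (out : List (String × List (String × Int))) : Decidable (Spec_get_total_header_count headers req_res_err_headers key security_headers out) := by unfold Spec_get_total_header_count; infer_instance

-- ===== CLAIM (what is proved, stated in full; the proofs are below) =====
def Claim_equal_get_total_header_count : Prop := ∀ (headers : List (String × List (String × Int))) (req_res_err_headers : List String) (key : String) (security_headers : List String), Dom_get_total_header_count headers req_res_err_headers key security_headers → Spec_get_total_header_count headers req_res_err_headers key security_headers (get_total_header_count headers req_res_err_headers key security_headers)

-- ===== LEMMAS AND PROOFS =====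

-- the common "add c to d[x][key]" update both ports' loop bodies reduce to
def pvMrg (key : String) (d : PySem.Dict String (PySem.Dict String Int)) (x : String) (c : Int) : PySem.Dict String (PySem.Dict String Int) :=
  d.insert x (let inner := d.getD x PySem.Dict.empty; inner.insert key (inner.getD key 0 + c))

lemma stepA_eq (key : String) (sec : List String) (d : PySem.Dict String (PySem.Dict String Int)) (h : String) :
    (if !(sec.contains h) then d
     else if d.contains h then
       let inner := d.getD h PySem.Dict.empty
       if inner.contains key then
         d.insert h (inner.insert key (inner.getD key 0 + 1))
       else
         d.insert h (inner.insert key 1)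
     else
       d.insert h ((PySem.Dict.empty : PySem.Dict String Int).insert key 1))
    = (if sec.contains h then pvMrg key d h 1 else d) := by
  simp only [pvMrg]
  cases hs : sec.contains h <;>
    simp only [Bool.not_true, Bool.not_false, Bool.false_eq_true, if_true, if_false]
  cases hd : d.contains h <;> simp only [Bool.false_eq_true, ite_true, ite_false]
  · rw [PySem.Dict.getD_of_not_contains _ _ hd]
    simp [PySem.Dict.getD_empty]
  · cases hk : (d.getD h PySem.Dict.empty).contains key <;>
      simp only [Bool.false_eq_true, ite_true, ite_false]
    rw [PySem.Dict.getD_of_not_contains _ _ hk]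
    norm_num

lemma stepB_eq (key : String) (d : PySem.Dict String (PySem.Dict String Int)) (p : String × Int) :
    (let d1 := d.setdefault p.1 (PySem.Dict.empty : PySem.Dict String Int)
     let inner := d1.getD p.1 PySem.Dict.empty
     d1.insert p.1 (inner.insert key (inner.getD key 0 + p.2)))
    = pvMrg key d p.1 p.2 := by
  simp only [pvMrg]
  cases hd : d.contains p.1
  · rw [PySem.Dict.setdefault_of_not_contains _ _ hd,
        PySem.Dict.getD_insert_self, PySem.Dict.insert_insert_self,
        PySem.Dict.getD_of_not_contains _ _ hd]
  · rw [PySem.Dict.setdefault_of_contains _ _ hd]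

lemma mrg_succ (key : String) (d : PySem.Dict String (PySem.Dict String Int)) (x : String) (c : Int) :
    pvMrg key d x (c + 1) = pvMrg key (pvMrg key d x c) x 1 := by
  simp only [pvMrg, PySem.Dict.getD_insert_self, PySem.Dict.insert_insert_self]
  ring_nf

lemma mrg_comm (key : String) (d : PySem.Dict String (PySem.Dict String Int)) (x h : String) (c : Int)
    (hne : h ≠ x) (hc : d.contains x = true) :
    pvMrg key (pvMrg key d x 1) h c = pvMrg key (pvMrg key d h c) x 1 := by
  simp only [pvMrg]
  rw [PySem.Dict.getD_insert_of_ne _ _ _ hne, PySem.Dict.getD_insert_of_ne _ _ _ (Ne.symm hne)]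
  apply PySem.Dict.ext
  have hcx : (d.insert h ((d.getD h PySem.Dict.empty).insert key ((d.getD h PySem.Dict.empty).getD key 0 + c))).contains x = true := by
    rw [PySem.Dict.contains_insert]
    simp [hc]
  cases hh : d.contains h
  · have hh2 : (d.insert x ((d.getD x PySem.Dict.empty).insert key ((d.getD x PySem.Dict.empty).getD key 0 + 1))).contains h = false := by
      rw [PySem.Dict.contains_insert]
      simp [hh, hne]
    rw [PySem.Dict.items_insert_of_not_contains _ _ hh2,
        PySem.Dict.items_insert_of_contains _ _ hcx,
        PySem.Dict.items_insert_of_contains _ _ hc,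
        PySem.Dict.items_insert_of_not_contains _ _ hh,
        List.map_append]
    congr 1
    simp [hne]
  · have hh2 : (d.insert x ((d.getD x PySem.Dict.empty).insert key ((d.getD x PySem.Dict.empty).getD key 0 + 1))).contains h = true := by
      rw [PySem.Dict.contains_insert]
      simp [hh]
    rw [PySem.Dict.items_insert_of_contains _ _ hh2,
        PySem.Dict.items_insert_of_contains _ _ hcx,
        PySem.Dict.items_insert_of_contains _ _ hc,
        PySem.Dict.items_insert_of_contains _ _ hh,
        List.map_map, List.map_map]
    apply List.map_congr_left
    intro p _
    by_cases hpx : p.1 = x <;> by_cases hph : p.1 = h <;>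
      simp [Function.comp, hpx, hph, hne, Ne.symm hne]

lemma contains_mrg (key : String) (d : PySem.Dict String (PySem.Dict String Int)) (x y : String) (c : Int) :
    (pvMrg key d y c).contains x = (x == y || d.contains x) := by
  simp only [pvMrg]; rw [PySem.Dict.contains_insert]

lemma foldl_mrg_out (key : String) (rest : List (String × Int)) (d : PySem.Dict String (PySem.Dict String Int)) (x : String)
    (hc : d.contains x = true) (hk : ∀ p ∈ rest, p.1 ≠ x) :
    rest.foldl (fun d p => pvMrg key d p.1 p.2) (pvMrg key d x 1)
    = pvMrg key (rest.foldl (fun d p => pvMrg key d p.1 p.2) d) x 1 := by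
  induction rest generalizing d with
  | nil => rfl
  | cons p rest ih =>
    simp only [List.foldl_cons]
    rw [mrg_comm key d x p.1 p.2 (hk p (by exact List.mem_cons_self)) hc]
    exact ih (pvMrg key d p.1 p.2)
      (by rw [contains_mrg]; simp [hc])
      (fun q hq => hk q (List.mem_cons_of_mem _ hq))

lemma foldl_mrg_bump (key : String) (ps : List (String × Int)) (d : PySem.Dict String (PySem.Dict String Int)) (x : String)
    (hnd : (ps.map Prod.fst).Nodup) (hx : x ∈ ps.map Prod.fst) :
    (ps.map (fun p => if p.1 = x then (p.1, p.2 + 1) else p)).foldl (fun d p => pvMrg key d p.1 p.2) d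
    = pvMrg key (ps.foldl (fun d p => pvMrg key d p.1 p.2) d) x 1 := by
  induction ps generalizing d with
  | nil => simp at hx
  | cons p ps ih =>
    rw [List.map_cons, List.nodup_cons] at hnd
    by_cases hpx : p.1 = x
    · subst hpx
      have hrest : ∀ q ∈ ps, q.1 ≠ p.1 := by
        intro q hq heq
        exact hnd.1 (heq ▸ List.mem_map_of_mem hq)
      have hmap : ps.map (fun q => if q.1 = p.1 then (q.1, q.2 + 1) else q) = ps := by
        refine (List.map_congr_left ?_).trans (List.map_id ps)
        intro q hq
        simp [hrest q hq]
      rw [List.map_cons, if_pos rfl, List.foldl_cons, List.foldl_cons, hmap, mrg_succ]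
      exact foldl_mrg_out key ps (pvMrg key d p.1 p.2) p.1
        (by rw [contains_mrg]; simp) hrest
    · have hx' : x ∈ ps.map Prod.fst := by
        rcases List.mem_cons.mp hx with h1 | h1
        · exact absurd h1.symm hpx
        · exact h1
      rw [List.map_cons, if_neg hpx, List.foldl_cons, List.foldl_cons]
      exact ih (pvMrg key d p.1 p.2) hnd.2 hx'

lemma main_lemma (key : String) (l : List String) (d : PySem.Dict String (PySem.Dict String Int)) :
    l.foldl (fun d h => pvMrg key d h 1) d
    = (PySem.Dict.counter l).items.foldl (fun d p => pvMrg key d p.1 p.2) d := by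
  induction l using List.reverseRecOn generalizing d with
  | nil => rfl
  | append_singleton l x ih =>
    rw [List.foldl_append, List.foldl_cons, List.foldl_nil, ih, PySem.Dict.items_counter,
        PySem.Dict.items_counter, PySem.Set.ofList_append_singleton]
    by_cases hxl : x ∈ l
    · have hmem : x ∈ PySem.Set.ofList l := (PySem.Set.mem_ofList _ _).mpr hxl
      rw [PySem.Set.add_of_mem hmem]
      have hcounts : (PySem.Set.ofList l).map (fun k => (k, ((l ++ [x]).count k : Int)))
          = ((PySem.Set.ofList l).map (fun k => (k, (l.count k : Int)))).map
              (fun p => if p.1 = x then (p.1, p.2 + 1) else p) := by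
        rw [List.map_map]
        apply List.map_congr_left
        intro k _
        by_cases hkx : k = x
        · simp [hkx, List.count_append]
        · simp [List.count_append, hkx, Ne.symm hkx]
      rw [hcounts]
      have hfst : ((PySem.Set.ofList l).map (fun k => (k, (l.count k : Int)))).map Prod.fst
          = PySem.Set.ofList l := by
        rw [List.map_map]
        exact (List.map_congr_left (fun a _ => rfl)).trans (List.map_id _)
      refine (foldl_mrg_bump key _ d x ?_ ?_).symm
      · rw [hfst]; exact PySem.Set.nodup_ofList l
      · rw [hfst]; exact hmem
    · have hmem : x ∉ PySem.Set.ofList l := fun h => hxl ((PySem.Set.mem_ofList _ _).mp h)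
      rw [PySem.Set.add_of_not_mem hmem, List.map_append, List.foldl_append]
      have hcounts : (PySem.Set.ofList l).map (fun k => (k, ((l ++ [x]).count k : Int)))
          = (PySem.Set.ofList l).map (fun k => (k, (l.count k : Int))) := by
        apply List.map_congr_left
        intro k hk
        have hkx : k ≠ x := fun h => hmem (h ▸ hk)
        simp [List.count_append, Ne.symm hkx]
      rw [hcounts]
      simp only [List.map_cons, List.map_nil, List.foldl_cons, List.foldl_nil]
      have : ((l ++ [x]).count x : Int) = 1 := by
        simp [List.count_append, List.count_eq_zero_of_not_mem hxl]
      rw [this]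

-- ===== VERDICT (by name: the statement is the Claim_ definition above) =====
theorem get_total_header_count_spec : Claim_equal_get_total_header_count := by
  intro headers req key sec _
  unfold Spec_get_total_header_count
  unfold get_total_header_count get_total_header_count_alt
  simp only [stepA_eq, stepB_eq]
  rw [← List.foldl_filter, ← List.foldl_filter,
      PySem.Dict.foldl_insert_getD_add_one_eq_counter, main_lemma]
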